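-- pv_equiv track=rewrite | github.com/ssoulistic/AlgorithmAttack | 프로그래머스/2/340212. ［PCCP 기출문제］ 2번 ／ 퍼즐 게임 챌린지/［PCCP 기출문제］ 2번 ／ 퍼즐 게임 챌린지.py | solution
-- ===== SOURCE A (Python) =====
-- def solve_pb(diffs,times,level):
--     acc=times[0]
--     for i in range(1,len(diffs)):
--         acc+=max(0,diffs[i]-level)*(times[i-1]+times[i])+times[i]
--     return acc
--
-- def solution(diffs, times, limit):
--     start = 0
--     end =  100001
--     while start+1<end:
--         mid=(start+end)//2
--         if solve_pb(diffs,times,mid)<=limit: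
--             end=mid
--         else:
--             start=mid
--     return end
-- ===== SOURCE B (Python) =====
-- def solve_pb(diffs, times, level):
--     acc = times[0]
--     for i in range(1, len(diffs)):
--         acc += max(0, diffs[i] - level) * (times[i - 1] + times[i]) + times[i]
--     return acc
--
-- def solution(diffs, times, limit):
--     for level in range(1, 100001):
--         if solve_pb(diffs, times, level) <= limit:
--             return level
--     return 100001
-- ===== Notes on version B (the rewrite author's own statement) =====
-- stated objective: simpler
-- what changed: Replaced the binary search over levels with a linear scan that returns the first level in 1..100000 whose solve time fits the limit (same 100001 fallback); equal because solve_pb is non-increasing in level on the natural domain of nonnegative times.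
-- outside the precondition, e.g. on solution([1, 16, 20], [-10, -9, 3], -48): A returns 100001, B returns 1
import Mathlib
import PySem

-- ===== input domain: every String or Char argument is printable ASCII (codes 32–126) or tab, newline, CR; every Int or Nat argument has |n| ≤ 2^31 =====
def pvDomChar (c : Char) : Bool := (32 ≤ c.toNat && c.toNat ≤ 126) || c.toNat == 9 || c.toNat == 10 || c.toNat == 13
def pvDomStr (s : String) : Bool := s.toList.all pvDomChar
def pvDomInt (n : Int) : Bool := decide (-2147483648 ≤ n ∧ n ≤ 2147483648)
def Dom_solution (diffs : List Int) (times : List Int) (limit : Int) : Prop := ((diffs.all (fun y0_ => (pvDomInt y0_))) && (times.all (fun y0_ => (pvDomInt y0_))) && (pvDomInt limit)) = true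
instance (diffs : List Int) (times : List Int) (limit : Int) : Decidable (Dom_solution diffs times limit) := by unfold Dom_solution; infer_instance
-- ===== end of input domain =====

-- B replaces A's binary search with a linear scan for the first qualifying level: simpler, same result
-- because solve_pb is non-increasing in level on the stated domain (nonnegative times).

-- ===== PORT A =====
-- solve_pb: out-of-range indexing (times[0] on [], times[i] past the end) raises in Python and is
-- excluded by Pre_solution; pyGetD's default 0 is never reached inside Pre_.
def solvePb (diffs : List Int) (times : List Int) (level : Int) : Int :=
  (PySem.List.pyRange 1 diffs.length 1).foldl
    (fun acc i =>
      acc + max 0 (PySem.List.pyGetD diffs i 0 - level) *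
              (PySem.List.pyGetD times (i - 1) 0 + PySem.List.pyGetD times i 0) +
            PySem.List.pyGetD times i 0)
    (PySem.List.pyGetD times 0 0)

-- the while loop of A, recursion on end - start
def solutionLoop (diffs : List Int) (times : List Int) (limit : Int) (start e : Int) : Int :=
  if h : start + 1 < e then
    let mid := PySem.Int.floordiv (start + e) 2
    if solvePb diffs times mid ≤ limit then
      solutionLoop diffs times limit start mid
    else
      solutionLoop diffs times limit mid e
  else e
termination_by (e - start).toNat
decreasing_by
  · have h1 : start + 1 ≤ PySem.Int.floordiv (start + e) 2 :=
      (PySem.Int.le_floordiv_iff_mul_le (by omega)).mpr (by omega)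
    have h2 : PySem.Int.floordiv (start + e) 2 < e :=
      (PySem.Int.floordiv_lt_iff_lt_mul (by omega)).mpr (by omega)
    omega
  · have h2 : PySem.Int.floordiv (start + e) 2 < e :=
      (PySem.Int.floordiv_lt_iff_lt_mul (by omega)).mpr (by omega)
    have h1 : start + 1 ≤ PySem.Int.floordiv (start + e) 2 :=
      (PySem.Int.le_floordiv_iff_mul_le (by omega)).mpr (by omega)
    omega

def solution (diffs : List Int) (times : List Int) (limit : Int) : Int :=
  solutionLoop diffs times limit 0 100001

-- ===== PORT B =====
-- the for-level-in-range(1,100001) loop with early return, as find? over the same range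
def solution_alt (diffs : List Int) (times : List Int) (limit : Int) : Int :=
  ((PySem.List.pyRange 1 100001 1).find? (fun level => solvePb diffs times level ≤ limit)).getD 100001

-- ===== PRECONDITION & SPEC =====
-- Pre_ excludes (a) inputs on which A raises IndexError (empty times, or diffs longer than times), and
-- (b) times containing a negative entry, on which solve_pb is non-monotone in level and the binary
-- search's converged level is an accident of its probe order.
def Pre_solution (diffs : List Int) (times : List Int) (limit : Int) : Prop :=
  times ≠ [] ∧ diffs.length ≤ times.length ∧ ∀ t ∈ times, 0 ≤ t
instance (diffs : List Int) (times : List Int) (limit : Int) : Decidable (Pre_solution diffs times limit) := by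
  unfold Pre_solution; infer_instance

def pvWitness_solution : List Int × List Int × Int := ([1, 5, 3], [10, 20, 8], 120)

def Spec_solution (diffs : List Int) (times : List Int) (limit : Int) (out : Int) : Prop := out = solution_alt diffs times limit
instance (diffs : List Int) (times : List Int) (limit : Int) (out : Int) : Decidable (Spec_solution diffs times limit out) := by unfold Spec_solution; infer_instance

-- ===== CLAIM (what is proved, stated in full; the proofs are below) =====
def Claim_equal_solution : Prop := ∀ (diffs : List Int) (times : List Int) (limit : Int), Dom_solution diffs times limit → Pre_solution diffs times limit → Spec_solution diffs times limit (solution diffs times limit)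

-- ===== LEMMAS AND PROOFS =====

-- solve_pb is non-increasing in level when every time is nonnegative
theorem solvePb_antitone (diffs times : List Int) (ht : ∀ t ∈ times, 0 ≤ t)
    {l l' : Int} (h : l ≤ l') :
    solvePb diffs times l' ≤ solvePb diffs times l := by
  have hd : ∀ i : Int, 0 ≤ PySem.List.pyGetD times i 0 := by
    intro i
    by_cases hir : PySem.Raise.InRange times.length i
    · exact ht _ (PySem.List.pyGetD_mem times (i := i) 0 hir)
    · have hn := (PySem.List.pyGet?_eq_none_iff (xs := times) (i := i)).mpr hir
      simp [PySem.List.pyGetD, hn]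
  unfold solvePb
  have key : ∀ (is : List Int) (a b : Int), a ≤ b →
      is.foldl (fun acc i =>
        acc + max 0 (PySem.List.pyGetD diffs i 0 - l') *
                (PySem.List.pyGetD times (i - 1) 0 + PySem.List.pyGetD times i 0) +
              PySem.List.pyGetD times i 0) a ≤
      is.foldl (fun acc i =>
        acc + max 0 (PySem.List.pyGetD diffs i 0 - l) *
                (PySem.List.pyGetD times (i - 1) 0 + PySem.List.pyGetD times i 0) +
              PySem.List.pyGetD times i 0) b := by
    intro is
    induction is with
    | nil => intro a b hab; simpa using hab
    | cons i is ih =>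
      intro a b hab
      simp only [List.foldl_cons]
      apply ih
      have h1 : max 0 (PySem.List.pyGetD diffs i 0 - l') ≤ max 0 (PySem.List.pyGetD diffs i 0 - l) := by omega
      have h2 : 0 ≤ PySem.List.pyGetD times (i - 1) 0 + PySem.List.pyGetD times i 0 := by
        have := hd (i - 1); have := hd i; omega
      nlinarith [mul_le_mul_of_nonneg_right h1 h2]
  exact key _ _ _ le_rfl

-- find? on a strictly increasing list picks r if r is in it, satisfies p, and nothing smaller does
theorem find?_pairwise_eq_some {p : Int → Bool} {l : List Int} {r : Int}
    (hp : l.Pairwise (· < ·)) (hr : r ∈ l) (hpr : p r = true)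
    (hlt : ∀ x ∈ l, x < r → p x = false) :
    l.find? p = some r := by
  induction l with
  | nil => cases hr
  | cons a l ih =>
    rcases List.mem_cons.mp hr with rfl | hr'
    · simp [List.find?, hpr]
    · have ha : a < r := (List.pairwise_cons.mp hp).1 r hr'
      have : p a = false := hlt a List.mem_cons_self ha
      simp only [List.find?, this]
      exact ih (List.pairwise_cons.mp hp).2 hr'
        (fun x hx hxr => hlt x (List.mem_cons_of_mem _ hx) hxr)

-- the binary-search loop returns the first qualifying level, under its invariant
theorem solutionLoop_eq (diffs times : List Int) (limit : Int)
    (ht : ∀ t ∈ times, 0 ≤ t) :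
    ∀ n (start e : Int), (e - start).toNat = n →
    0 ≤ start → start < e → e ≤ 100001 →
    (∀ l : Int, 1 ≤ l → l ≤ start → ¬ solvePb diffs times l ≤ limit) →
    (solvePb diffs times e ≤ limit ∨ e = 100001) →
    solutionLoop diffs times limit start e = solution_alt diffs times limit := by
  intro n
  induction n using Nat.strong_induction_on with
  | _ n ih =>
    intro start e hn h0 hse he hlo hhi
    rw [solutionLoop]
    split
    · next h =>
      have hm1 : start + 1 ≤ PySem.Int.floordiv (start + e) 2 :=
        (PySem.Int.le_floordiv_iff_mul_le (by omega)).mpr (by omega)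
      have hm2 : PySem.Int.floordiv (start + e) 2 < e :=
        (PySem.Int.floordiv_lt_iff_lt_mul (by omega)).mpr (by omega)
      dsimp only
      split
      · next hq =>
        exact ih (PySem.Int.floordiv (start + e) 2 - start).toNat (by omega) start _ rfl h0 (by omega) (by omega)
          hlo (Or.inl hq)
      · next hq =>
        refine ih (e - PySem.Int.floordiv (start + e) 2).toNat (by omega) _ e rfl (by omega) (by omega) he ?_ hhi
        intro l hl1 hlm hpl
        exact hq (le_trans (solvePb_antitone diffs times ht hlm) hpl)
    · next h =>
      have hee : e = start + 1 := by omega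
      unfold solution_alt
      by_cases hbig : e = 100001
      · subst hbig
        have : (PySem.List.pyRange 1 100001 1).find?
            (fun level => solvePb diffs times level ≤ limit) = none := by
          apply List.find?_eq_none.mpr
          intro x hx
          have := (PySem.List.mem_pyRange_one).mp hx
          simp only [decide_eq_true_eq] at *
          exact fun hc => hlo x this.1 (by omega) hc
        simp [this]
      · have hq : solvePb diffs times e ≤ limit := hhi.resolve_right hbig
        have : (PySem.List.pyRange 1 100001 1).find?
            (fun level => solvePb diffs times level ≤ limit) = some e := by
          apply find?_pairwise_eq_some (PySem.List.pairwise_lt_pyRange_one 1 100001)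
          · exact (PySem.List.mem_pyRange_one).mpr ⟨by omega, by omega⟩
          · simp only [decide_eq_true_eq]; exact hq
          · intro x hx hxe
            have hm := (PySem.List.mem_pyRange_one).mp hx
            simp only [decide_eq_false_iff_not]
            exact hlo x hm.1 (by omega)
        simp [this]

-- ===== VERDICT (by name: the statement is the Claim_ definition above) =====
theorem solution_spec : Claim_equal_solution := by
  intro diffs times limit _ hpre
  unfold Spec_solution solution
  exact solutionLoop_eq diffs times limit hpre.2.2 100001 0 100001 rfl (by omega) (by omega)
    (by omega) (fun l h1 h2 => by omega) (Or.inr rfl)
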